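-- pv_equiv track=rewrite | github.com/danhat/15Puzzle | helperfunctions.py | h2_manhattan_distance
-- ===== SOURCE A (Python) =====
-- goal_matrix = [
--   [1, 2, 3, 4],
--   [5, 6, 7, 8],
--   [9, 10, 11, 12],
--   [13, 14, 15, 0]
-- ]
--
-- def h2_manhattan_distance(matrix):
--   i = 0
--   distance = 0
--   while (i < 4):
--     j = 0
--     while (j < 4):
--       if(matrix[i][j] != goal_matrix[i][j] and matrix[i][j] != 0):
--         value = matrix[i][j]
--         k = 0
--         while (k < 4):
--           l = 0
--           while (l < 4):
--             if (goal_matrix[k][l] == value):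
--               #dis = abs((i + j) - (k + l))
--               dis = abs(i - k) + abs(j - l)
--               distance = distance + dis
--               l, k = 4, 4
--             l = l + 1
--           k = k + 1
--       j = j + 1
--     i = i + 1
--   return distance
-- ===== SOURCE B (Python) =====
-- def h2_manhattan_distance(matrix):
--   distance = 0
--   for i in range(4):
--     for j in range(4):
--       v = matrix[i][j]
--       if 1 <= v <= 15:
--         distance += abs(i - (v - 1) // 4) + abs(j - (v - 1) % 4)
--   return distance
-- ===== Notes on version B (the rewrite author's own statement) =====
-- stated objective: simpler
-- what changed: B drops A's inner 4x4 linear search of the goal matrix and computes each tile's goal position directly with the closed form r=(v-1)//4, c=(v-1)%4 inside a single pass over the 16 cells.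
import Mathlib
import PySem

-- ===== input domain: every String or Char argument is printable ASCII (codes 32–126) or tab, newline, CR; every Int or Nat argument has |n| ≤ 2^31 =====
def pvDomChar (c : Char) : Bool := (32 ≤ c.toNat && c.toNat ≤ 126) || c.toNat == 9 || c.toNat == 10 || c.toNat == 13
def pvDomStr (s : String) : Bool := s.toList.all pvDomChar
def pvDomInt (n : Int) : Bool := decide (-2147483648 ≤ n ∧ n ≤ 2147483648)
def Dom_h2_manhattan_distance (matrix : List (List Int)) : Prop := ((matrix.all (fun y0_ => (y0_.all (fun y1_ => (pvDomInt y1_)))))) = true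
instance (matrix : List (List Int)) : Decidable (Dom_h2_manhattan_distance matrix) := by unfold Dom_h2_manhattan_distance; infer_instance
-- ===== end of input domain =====

-- B replaces A's inner 4×4 scan of the goal matrix by the closed-form goal position r=(v-1)//4, c=(v-1)%4 (objective: simpler).

-- ===== PORT A =====
def pvGoalMatrix : List (List Int) := [[1,2,3,4],[5,6,7,8],[9,10,11,12],[13,14,15,0]]

-- cell access m[i][j] for nonnegative loop counters (in range under Pre_)
def pvCell (m : List (List Int)) (i j : Nat) : Int := (m.getD i []).getD j 0

-- each 'while c < 4' loop carries its counter plus structural fuel (= the iterations left, 4 - counter)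

-- inner 'while l < 4' with its break (l, k = 4, 4): first matching l in row k, none if the row has no match
def pvScanL (value : Int) (k : Nat) : Nat → Nat → Option (Nat × Nat)
  | _, 0 => none
  | l, fuel + 1 =>
    if l < 4 then
      if pvCell pvGoalMatrix k l = value then some (k, l)
      else pvScanL value k (l + 1) fuel
    else none

-- 'while k < 4' with the break propagated
def pvScanK (value : Int) : Nat → Nat → Option (Nat × Nat)
  | _, 0 => none
  | k, fuel + 1 =>
    if k < 4 then
      match pvScanL value k 0 4 with
      | some p => some p
      | none => pvScanK value (k + 1) fuel
    else none

-- the body of the j-loop: the conditional update of 'distance'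
def pvUpd (m : List (List Int)) (i j : Nat) (distance : Int) : Int :=
  let v := pvCell m i j
  if v ≠ pvCell pvGoalMatrix i j ∧ v ≠ 0 then
    match pvScanK v 0 4 with
    | some (k, l) => distance + (|(i : Int) - (k : Int)| + |(j : Int) - (l : Int)|)
    | none => distance
  else distance

def pvLoopJ (m : List (List Int)) (i : Nat) : Nat → Int → Nat → Int
  | _, distance, 0 => distance
  | j, distance, fuel + 1 =>
    if j < 4 then pvLoopJ m i (j + 1) (pvUpd m i j distance) fuel else distance

def pvLoopI (m : List (List Int)) : Nat → Int → Nat → Int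
  | _, distance, 0 => distance
  | i, distance, fuel + 1 =>
    if i < 4 then pvLoopI m (i + 1) (pvLoopJ m i 0 distance 4) fuel else distance

def h2_manhattan_distance (matrix : List (List Int)) : Int := pvLoopI matrix 0 0 4

-- ===== PORT B =====
def pvInnerB (m : List (List Int)) (i : Nat) (acc : Int) (j : Nat) : Int :=
  let v := (m.getD i []).getD j 0
  if 1 ≤ v ∧ v ≤ 15 then
    acc + (|(i : Int) - PySem.Int.floordiv (v - 1) 4| + |(j : Int) - PySem.Int.mod (v - 1) 4|)
  else acc

def h2_manhattan_distance_alt (matrix : List (List Int)) : Int :=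
  (List.range 4).foldl (fun acc i => (List.range 4).foldl (pvInnerB matrix i) acc) 0

-- ===== PRECONDITION & SPEC =====
-- exactly the inputs on which Python A returns: the first four rows must exist and each have at least
-- four entries (otherwise matrix[i][j] raises IndexError)
def Pre_h2_manhattan_distance (matrix : List (List Int)) : Prop :=
  4 ≤ matrix.length ∧ ∀ r ∈ matrix.take 4, 4 ≤ r.length
instance (matrix : List (List Int)) : Decidable (Pre_h2_manhattan_distance matrix) := by
  unfold Pre_h2_manhattan_distance; infer_instance
def pvWitness_h2_manhattan_distance : List (List Int) :=
  [[1,2,3,4],[5,6,7,8],[9,10,11,12],[13,15,14,0]]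
def Spec_h2_manhattan_distance (matrix : List (List Int)) (out : Int) : Prop := out = h2_manhattan_distance_alt matrix
instance (matrix : List (List Int)) (out : Int) : Decidable (Spec_h2_manhattan_distance matrix out) := by unfold Spec_h2_manhattan_distance; infer_instance

-- ===== CLAIM (what is proved, stated in full; the proofs are below) =====
def Claim_equal_h2_manhattan_distance : Prop := ∀ (matrix : List (List Int)), Dom_h2_manhattan_distance matrix → Pre_h2_manhattan_distance matrix → Spec_h2_manhattan_distance matrix (h2_manhattan_distance matrix)

-- ===== LEMMAS AND PROOFS =====

-- A's per-cell contribution, abstracted out of the running accumulator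
def pvCA (g v : Int) (i j : Nat) : Int :=
  if v ≠ g ∧ v ≠ 0 then
    match pvScanK v 0 4 with
    | some (k, l) => |(i : Int) - (k : Int)| + |(j : Int) - (l : Int)|
    | none => 0
  else 0

-- B's per-cell contribution
def pvCB (v : Int) (i j : Nat) : Int :=
  if 1 ≤ v ∧ v ≤ 15 then
    |(i : Int) - PySem.Int.floordiv (v - 1) 4| + |(j : Int) - PySem.Int.mod (v - 1) 4|
  else 0

lemma pvScanL_some (value : Int) (k : Nat) :
    ∀ fuel l k' l', pvScanL value k l fuel = some (k', l') →
      k' = k ∧ l' < 4 ∧ pvCell pvGoalMatrix k' l' = value := by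
  intro fuel
  induction fuel with
  | zero => intro l k' l' h; simp [pvScanL] at h
  | succ n ih =>
    intro l k' l' h
    rw [pvScanL] at h
    split_ifs at h with h4 hv
    · obtain ⟨rfl, rfl⟩ : k = k' ∧ l = l' := by
        constructor <;> (cases h; rfl)
      exact ⟨rfl, h4, hv⟩
    · exact ih _ _ _ h

lemma pvScanK_some (value : Int) :
    ∀ fuel k k' l', pvScanK value k fuel = some (k', l') →
      k' < 4 ∧ l' < 4 ∧ pvCell pvGoalMatrix k' l' = value := by
  intro fuel
  induction fuel with
  | zero => intro k k' l' h; simp [pvScanK] at h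
  | succ n ih =>
    intro k k' l' h
    rw [pvScanK] at h
    split_ifs at h with h4
    · cases hs : pvScanL value k 0 4 with
      | some p =>
        rw [hs] at h; cases h
        obtain ⟨hk, hl, he⟩ := pvScanL_some value k 4 0 k' l' hs
        exact ⟨by omega, hl, he⟩
      | none => rw [hs] at h; exact ih _ _ _ h

lemma pvGoal_range (k l : Nat) (hk : k < 4) (hl : l < 4) :
    0 ≤ pvCell pvGoalMatrix k l ∧ pvCell pvGoalMatrix k l ≤ 15 := by
  interval_cases k <;> interval_cases l <;> decide

lemma pvScanK_none (v : Int) (h : v < 0 ∨ 15 < v) : pvScanK v 0 4 = none := by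
  cases hs : pvScanK v 0 4 with
  | none => rfl
  | some p =>
    obtain ⟨k', l'⟩ := p
    obtain ⟨hk, hl, he⟩ := pvScanK_some v 4 0 k' l' hs
    have := pvGoal_range k' l' hk hl
    omega

lemma pvCell_eq (i j : Nat) (hi : i < 4) (hj : j < 4) (v : Int) :
    pvCA (pvCell pvGoalMatrix i j) v i j = pvCB v i j := by
  by_cases h15 : 1 ≤ v ∧ v ≤ 15
  · obtain ⟨h1, h2⟩ := h15
    interval_cases i <;> interval_cases j <;> interval_cases v <;> decide
  · rw [pvCB, if_neg h15]
    rw [pvCA]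
    by_cases h0 : v = 0
    · subst h0; simp
    · rw [pvScanK_none v (by omega)]
      split_ifs <;> rfl

lemma pvUpd_eq (m : List (List Int)) (i j : Nat) (d : Int) :
    pvUpd m i j d = d + pvCA (pvCell pvGoalMatrix i j) (pvCell m i j) i j := by
  rw [pvUpd, pvCA]
  split_ifs with hc
  · cases hs : pvScanK (pvCell m i j) 0 4 with
    | none => simp
    | some p => cases p; simp
  · simp

lemma pvLoopJ_zero (m : List (List Int)) (i : Nat) (d : Int) :
    pvLoopJ m i 0 d 4 = d + pvCA (pvCell pvGoalMatrix i 0) (pvCell m i 0) i 0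
      + pvCA (pvCell pvGoalMatrix i 1) (pvCell m i 1) i 1
      + pvCA (pvCell pvGoalMatrix i 2) (pvCell m i 2) i 2
      + pvCA (pvCell pvGoalMatrix i 3) (pvCell m i 3) i 3 := by
  simp [pvLoopJ, pvUpd_eq]

lemma pvInnerB_acc (m : List (List Int)) (i : Nat) (acc : Int) (j : Nat) :
    pvInnerB m i acc j = acc + pvCB (pvCell m i j) i j := by
  rw [pvInnerB, pvCB, pvCell]
  split_ifs <;> simp

lemma pvRowB (m : List (List Int)) (i : Nat) (acc : Int) :
    (List.range 4).foldl (pvInnerB m i) acc =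
      acc + pvCB (pvCell m i 0) i 0 + pvCB (pvCell m i 1) i 1
        + pvCB (pvCell m i 2) i 2 + pvCB (pvCell m i 3) i 3 := by
  show List.foldl _ acc [0, 1, 2, 3] = _
  simp only [List.foldl, pvInnerB_acc]

-- ===== VERDICT (by name: the statement is the Claim_ definition above) =====
theorem h2_manhattan_distance_spec : Claim_equal_h2_manhattan_distance := by
  intro m _dom _pre
  show h2_manhattan_distance m = h2_manhattan_distance_alt m
  rw [h2_manhattan_distance, h2_manhattan_distance_alt]
  show _ = List.foldl _ 0 [0, 1, 2, 3]
  simp only [List.foldl, pvRowB]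
  simp [pvLoopI, pvLoopJ_zero]
  simp only [pvCell_eq 0 0 (by norm_num) (by norm_num), pvCell_eq 0 1 (by norm_num) (by norm_num), pvCell_eq 0 2 (by norm_num) (by norm_num), pvCell_eq 0 3 (by norm_num) (by norm_num), pvCell_eq 1 0 (by norm_num) (by norm_num), pvCell_eq 1 1 (by norm_num) (by norm_num), pvCell_eq 1 2 (by norm_num) (by norm_num), pvCell_eq 1 3 (by norm_num) (by norm_num), pvCell_eq 2 0 (by norm_num) (by norm_num), pvCell_eq 2 1 (by norm_num) (by norm_num), pvCell_eq 2 2 (by norm_num) (by norm_num), pvCell_eq 2 3 (by norm_num) (by norm_num), pvCell_eq 3 0 (by norm_num) (by norm_num), pvCell_eq 3 1 (by norm_num) (by norm_num), pvCell_eq 3 2 (by norm_num) (by norm_num), pvCell_eq 3 3 (by norm_num) (by norm_num)]
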